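-- pv_equiv track=rewrite | github.com/samdmarshall/nslocalizer | pylocalizer/pyXcode/pbProj/pbPlist/string_helper.py | IndexOfNextNonSpace
-- ===== SOURCE A (Python) =====
-- def IsSpecialWhitespace(character):
--     value = ord(character)
--     return (value >= 9 and value <= 13) # tab, newline, vt, form feed, carriage return
--
-- def IsUnicodeSeparator(character):
--     value = ord(character)
--     return (value == 8232 or value == 8233)
--
-- def IsRegularWhitespace(character):
--     value = ord(character)
--     return (value == 32 or IsUnicodeSeparator(character)) # space and Unicode line sep, para sep
--
-- def IsNewline(character):
--     value = ord(character)
--     return (value == 13 or value == 10)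
--
-- def IsEndOfLine(character):
--     return (IsNewline(character) or IsUnicodeSeparator(character))
--
-- def IndexOfNextNonSpace(string_data, current_index):
--     successful = False
--     found_index = current_index
--     string_length = len(string_data)
--     annotation_string = ''
--     while found_index < string_length:
--         current_char = string_data[found_index]
--         if IsSpecialWhitespace(current_char) == True:
--             found_index += 1
--             continue
--         if IsRegularWhitespace(current_char) == True:
--             found_index += 1
--             continue
--         if current_char == '/':
--             next_index = found_index + 1
--             if next_index >= string_length:
--                 successful = True
--                 break
--             else:
--                 next_character = string_data[next_index]
--                 if next_character == '/': # found a line comment "//"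
--                     found_index += 1
--                     next_index = found_index
--                     first_pass = True
--                     while next_index < string_length:
--                         test_char = string_data[next_index]
--                         if IsEndOfLine(test_char) == True:
--                             break
--                         else:
--                             if first_pass != True:
--                                 annotation_string += test_char
--                             else:
--                                 first_pass = False
--                         next_index += 1
--                     found_index = next_index
--                 elif next_character == '*': # found a block comment "/* ... */"
--                     found_index += 1
--                     next_index = found_index
--                     first_pass = True
--                     while next_index < string_length:
--                         test_char = string_data[next_index]
--                         if test_char == '*' and (next_index+1 < string_length) and string_data[next_index+1] == '/':
--                             next_index += 2
--                             break
--                         else: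
--                             if first_pass != True:
--                                 annotation_string += test_char
--                             else:
--                                 first_pass = False
--                         next_index += 1
--                     found_index = next_index
--                 else:
--                     successful = True
--                     break
--         else:
--             successful = True
--             break
--     return (successful, found_index, annotation_string)
-- ===== SOURCE B (Python) =====
-- EOL_SET = '\n\r\u2028\u2029'
--
-- def _is_skippable_space(c):
--     o = ord(c)
--     return (9 <= o <= 13) or o == 32 or o == 8232 or o == 8233
--
-- def IndexOfNextNonSpace(string_data, current_index):
--     n = len(string_data)
--     i = current_index
--     annotation = ''
--     while i < n:
--         c = string_data[i]
--         if _is_skippable_space(c):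
--             i += 1
--             continue
--         if c != '/':
--             return (True, i, annotation)
--         if i + 1 >= n:
--             return (True, i, annotation)
--         nxt = string_data[i + 1]
--         if nxt == '/':
--             end = i + 2
--             while end < n and string_data[end] not in EOL_SET:
--                 end += 1
--             annotation += string_data[i + 2:end]
--             i = end
--         elif nxt == '*':
--             end = string_data.find('*/', i + 1)
--             if end == -1:
--                 annotation += string_data[i + 2:n]
--                 i = n
--             else:
--                 annotation += string_data[i + 2:end]
--                 i = end + 2
--         else:
--             return (True, i, annotation)
--     return (False, i, annotation)
-- ===== Notes on version B (the rewrite author's own statement) =====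
-- stated objective: simpler
-- what changed: A accumulates the annotation char-by-char inside two stateful inner loops with a first_pass flag; B instead finds the comment's end index (EOL scan for '//', str.find('*/') for block comments), appends one slice per comment, and early-returns from a single flat loop. Pre_ excludes negative current_index, where A either raises IndexError (current_index < -len) or, like any indexing re-implementation, returns a value shaped by accidental Python negative-index wraparound that no caller specifies.
-- outside the precondition, e.g. on IndexOfNextNonSpace('//x', -3): A returns (False, 3, 'x//x'), B returns (False, 3, 'x')
import Mathlib
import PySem

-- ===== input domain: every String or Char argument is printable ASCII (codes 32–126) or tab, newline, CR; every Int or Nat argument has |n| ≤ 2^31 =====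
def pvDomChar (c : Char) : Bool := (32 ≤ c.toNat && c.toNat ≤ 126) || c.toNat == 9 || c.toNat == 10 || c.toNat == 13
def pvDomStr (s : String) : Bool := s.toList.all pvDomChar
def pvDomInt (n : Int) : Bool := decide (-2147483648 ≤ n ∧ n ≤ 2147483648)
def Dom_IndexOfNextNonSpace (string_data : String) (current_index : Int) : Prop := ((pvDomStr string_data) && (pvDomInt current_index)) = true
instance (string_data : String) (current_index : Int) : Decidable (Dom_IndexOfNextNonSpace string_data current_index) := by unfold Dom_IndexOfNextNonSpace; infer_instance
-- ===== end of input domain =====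

-- B replaces A's char-by-char inner comment loops (with a first_pass flag) by end-index
-- scans plus one slice per comment in a flat early-returning loop; objective: simpler.


-- ===== PORT A =====
-- Python strings are modelled as List Char; the annotation accumulates as a List Char
-- and is packed with String.ofList at the end.  Loops are ported with a fuel parameter
-- (cs.length + current_index.natAbs + 1 steps always suffice: the index strictly
-- increases); fuel only makes the same computation total, it never changes a value the
-- Python computes.
def IsSpecialWhitespace (c : Char) : Bool := decide (9 ≤ c.toNat ∧ c.toNat ≤ 13)
def IsUnicodeSeparator (c : Char) : Bool := decide (c.toNat = 8232 ∨ c.toNat = 8233)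
def IsRegularWhitespace (c : Char) : Bool := decide (c.toNat = 32) || IsUnicodeSeparator c
def IsNewline (c : Char) : Bool := decide (c.toNat = 13 ∨ c.toNat = 10)
def IsEndOfLine (c : Char) : Bool := IsNewline c || IsUnicodeSeparator c

-- A's inner line-comment loop ("while next_index < string_length: …")
def pvALineScan (cs : List Char) (fuel : Nat) (next_index : Int) (first_pass : Bool)
    (ann : List Char) : Int × List Char :=
  match fuel with
  | 0 => (next_index, ann)
  | fuel + 1 =>
    if next_index < (cs.length : Int) then
      match PySem.List.pyGet? cs next_index with
      | none => (next_index, ann)       -- Python IndexError (unreachable for 0 ≤ next_index)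
      | some test_char =>
        if IsEndOfLine test_char then (next_index, ann)
        else if first_pass then pvALineScan cs fuel (next_index + 1) false ann
        else pvALineScan cs fuel (next_index + 1) false (ann ++ [test_char])
    else (next_index, ann)

-- A's inner block-comment loop
def pvABlockScan (cs : List Char) (fuel : Nat) (next_index : Int) (first_pass : Bool)
    (ann : List Char) : Int × List Char :=
  match fuel with
  | 0 => (next_index, ann)
  | fuel + 1 =>
    if next_index < (cs.length : Int) then
      match PySem.List.pyGet? cs next_index with
      | none => (next_index, ann)       -- Python IndexError (unreachable for 0 ≤ next_index)
      | some test_char =>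
        if test_char = '*' ∧ next_index + 1 < (cs.length : Int) ∧
            PySem.List.pyGet? cs (next_index + 1) = some '/' then
          (next_index + 2, ann)
        else if first_pass then pvABlockScan cs fuel (next_index + 1) false ann
        else pvABlockScan cs fuel (next_index + 1) false (ann ++ [test_char])
    else (next_index, ann)

-- A's outer "while found_index < string_length" loop
def pvALoop (cs : List Char) (fuel : Nat) (found_index : Int) (ann : List Char) :
    Bool × Int × List Char :=
  match fuel with
  | 0 => (false, found_index, ann)
  | fuel + 1 =>
    if found_index < (cs.length : Int) then
      match PySem.List.pyGet? cs found_index with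
      | none => (false, found_index, ann)   -- Python IndexError (outside Pre_)
      | some current_char =>
        if IsSpecialWhitespace current_char then pvALoop cs fuel (found_index + 1) ann
        else if IsRegularWhitespace current_char then pvALoop cs fuel (found_index + 1) ann
        else if current_char = '/' then
          if (cs.length : Int) ≤ found_index + 1 then (true, found_index, ann)
          else
            match PySem.List.pyGet? cs (found_index + 1) with
            | none => (false, found_index, ann)   -- Python IndexError (outside Pre_)
            | some next_character =>
              if next_character = '/' then
                let r := pvALineScan cs (fuel + 1) (found_index + 1) true ann
                pvALoop cs fuel r.1 r.2
              else if next_character = '*' then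
                let r := pvABlockScan cs (fuel + 1) (found_index + 1) true ann
                pvALoop cs fuel r.1 r.2
              else (true, found_index, ann)
        else (true, found_index, ann)
    else (false, found_index, ann)

def IndexOfNextNonSpace (string_data : String) (current_index : Int) : Bool × Int × String :=
  let cs := string_data.toList
  let r := pvALoop cs (cs.length + current_index.natAbs + 1) current_index []
  (r.1, r.2.1, String.ofList r.2.2)

-- ===== PORT B =====
def pvBIsSpace (c : Char) : Bool :=
  decide ((9 ≤ c.toNat ∧ c.toNat ≤ 13) ∨ c.toNat = 32 ∨ c.toNat = 8232 ∨ c.toNat = 8233)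

def pvBIsEol (c : Char) : Bool := c = '\n' || c = '\r' || decide (c.toNat = 8232 ∨ c.toNat = 8233)

-- B's "while end < n and string_data[end] not in EOL_SET: end += 1"
def pvBFindEol (cs : List Char) (fuel : Nat) (e : Int) : Int :=
  match fuel with
  | 0 => e
  | fuel + 1 =>
    if e < (cs.length : Int) then
      match PySem.List.pyGet? cs e with
      | none => e                       -- Python IndexError (unreachable for 0 ≤ e)
      | some c => if pvBIsEol c then e else pvBFindEol cs fuel (e + 1)
    else e

-- hand port of Python's string_data.find('*/', k), exact for 0 ≤ k (Pre_ gives 0 ≤ k)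
def pvBFindTerm (cs : List Char) (fuel : Nat) (k : Int) : Int :=
  match fuel with
  | 0 => -1
  | fuel + 1 =>
    if k < (cs.length : Int) then
      if PySem.List.pyGet? cs k = some '*' ∧ PySem.List.pyGet? cs (k + 1) = some '/' then k
      else pvBFindTerm cs fuel (k + 1)
    else -1

-- B's single outer loop; slices replace A's char-by-char accumulation
def pvBLoop (cs : List Char) (fuel : Nat) (i : Int) (ann : List Char) :
    Bool × Int × List Char :=
  match fuel with
  | 0 => (false, i, ann)
  | fuel + 1 =>
    if i < (cs.length : Int) then
      match PySem.List.pyGet? cs i with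
      | none => (false, i, ann)         -- Python IndexError (outside Pre_)
      | some c =>
        if pvBIsSpace c then pvBLoop cs fuel (i + 1) ann
        else if c ≠ '/' then (true, i, ann)
        else if (cs.length : Int) ≤ i + 1 then (true, i, ann)
        else
          match PySem.List.pyGet? cs (i + 1) with
          | none => (false, i, ann)     -- Python IndexError (outside Pre_)
          | some nxt =>
            if nxt = '/' then
              let e := pvBFindEol cs (fuel + 1) (i + 2)
              pvBLoop cs fuel e (ann ++ PySem.List.slice cs (some (i + 2)) (some e))
            else if nxt = '*' then
              let t := pvBFindTerm cs (fuel + 1) (i + 1)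
              if t = -1 then
                pvBLoop cs fuel (cs.length : Int)
                  (ann ++ PySem.List.slice cs (some (i + 2)) (some (cs.length : Int)))
              else pvBLoop cs fuel (t + 2) (ann ++ PySem.List.slice cs (some (i + 2)) (some t))
            else (true, i, ann)
    else (false, i, ann)

def IndexOfNextNonSpace_alt (string_data : String) (current_index : Int) : Bool × Int × String :=
  let cs := string_data.toList
  let r := pvBLoop cs (cs.length + current_index.natAbs + 1) current_index []
  (r.1, r.2.1, String.ofList r.2.2)

-- ===== PRECONDITION & SPEC =====
-- Pre_ excludes negative current_index, where A either raises IndexError (current_index < -len)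
-- or, like any indexing re-implementation, returns a value shaped by accidental Python
-- negative-index wraparound that no caller specifies.
def Pre_IndexOfNextNonSpace (string_data : String) (current_index : Int) : Prop :=
  0 ≤ current_index
instance (string_data : String) (current_index : Int) : Decidable (Pre_IndexOfNextNonSpace string_data current_index) := by unfold Pre_IndexOfNextNonSpace; infer_instance

def pvWitness_IndexOfNextNonSpace : String × Int := ("  // hi\n x", 0)

def Spec_IndexOfNextNonSpace (string_data : String) (current_index : Int) (out : Bool × Int × String) : Prop := out = IndexOfNextNonSpace_alt string_data current_index
instance (string_data : String) (current_index : Int) (out : Bool × Int × String) : Decidable (Spec_IndexOfNextNonSpace string_data current_index out) := by unfold Spec_IndexOfNextNonSpace; infer_instance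

-- ===== CLAIM (what is proved, stated in full; the proofs are below) =====
def Claim_equal_IndexOfNextNonSpace : Prop := ∀ (string_data : String) (current_index : Int), Dom_IndexOfNextNonSpace string_data current_index → Pre_IndexOfNextNonSpace string_data current_index → Spec_IndexOfNextNonSpace string_data current_index (IndexOfNextNonSpace string_data current_index)

-- ===== LEMMAS AND PROOFS =====

theorem pvCharEq (c d : Char) : (c = d) = (c.toNat = d.toNat) := by
  rw [eq_iff_iff]
  exact ⟨fun h => by rw [h], fun h => Char.ext (UInt32.toNat_inj.mp h)⟩

theorem pvSliceNil (cs : List Char) (j e : Int) (hj : 0 ≤ j) (he0 : 0 ≤ e) (he : e ≤ j) :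
    PySem.List.slice cs (some j) (some e) = [] := by
  rw [PySem.List.slice_toNat]
  · simp [List.take_eq_nil_iff]; omega
  · exact hj
  · exact he0

theorem pvSliceCons (cs : List Char) (j e : Int) (hj : 0 ≤ j) (hlt : j < (cs.length : Int))
    (hje : j < e) :
    PySem.List.slice cs (some j) (some e) =
      cs[j.toNat]'(by omega) :: PySem.List.slice cs (some (j + 1)) (some e) := by
  rw [PySem.List.slice_toNat, PySem.List.slice_toNat]
  · have hjn : j.toNat < cs.length := by omega
    have h1 : (j + 1).toNat = j.toNat + 1 := by omega
    have h2 : e.toNat - j.toNat = (e.toNat - (j + 1).toNat) + 1 := by omega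
    rw [List.drop_eq_getElem_cons hjn, h2, h1, List.take_succ_cons]
  all_goals omega

theorem pvEol_eq (c : Char) : IsEndOfLine c = pvBIsEol c := by
  unfold IsEndOfLine IsNewline IsUnicodeSeparator pvBIsEol
  simp only [pvCharEq, (show ('\n').toNat = 10 from rfl), (show ('\r').toNat = 13 from rfl)]
  by_cases a : c.toNat = 10
  · simp_all
  · by_cases b : c.toNat = 13
    · simp_all
    · by_cases d : c.toNat = 8232 ∨ c.toNat = 8233 <;> simp_all <;> omega

theorem pvSpace_eq (c : Char) :
    (IsSpecialWhitespace c || IsRegularWhitespace c) = pvBIsSpace c := by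
  unfold IsSpecialWhitespace IsRegularWhitespace IsUnicodeSeparator pvBIsSpace
  by_cases h1 : 9 ≤ c.toNat ∧ c.toNat ≤ 13
  · simp_all
  · by_cases h2 : c.toNat = 32 <;> by_cases h3 : c.toNat = 8232 ∨ c.toNat = 8233 <;> simp_all

theorem pvBFindEol_ge (cs : List Char) (f : Nat) : ∀ j : Int, j ≤ pvBFindEol cs f j := by
  induction f with
  | zero => intro j; simp [pvBFindEol]
  | succ f ih =>
    intro j
    rw [pvBFindEol]
    by_cases hlt : j < (cs.length : Int)
    · rw [if_pos hlt]
      cases hg : PySem.List.pyGet? cs j with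
      | none => simp
      | some c =>
        dsimp only
        by_cases heol : pvBIsEol c = true
        · rw [if_pos heol]
        · rw [if_neg heol]; have := ih (j + 1); omega
    · rw [if_neg hlt]

theorem pvBFindTerm_ge (cs : List Char) (f : Nat) :
    ∀ k : Int, pvBFindTerm cs f k = -1 ∨ k ≤ pvBFindTerm cs f k := by
  induction f with
  | zero => intro k; left; rfl
  | succ f ih =>
    intro k
    rw [pvBFindTerm]
    by_cases hlt : k < (cs.length : Int)
    · rw [if_pos hlt]
      by_cases hterm : PySem.List.pyGet? cs k = some '*' ∧
          PySem.List.pyGet? cs (k + 1) = some '/'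
      · rw [if_pos hterm]; right; omega
      · rw [if_neg hterm]
        rcases ih (k + 1) with h | h
        · left; exact h
        · right; omega
    · rw [if_neg hlt]; left; rfl

theorem pvBFindEol_fuel (cs : List Char) (f : Nat) :
    ∀ (f' : Nat) (j : Int), ((cs.length : Int) - j).toNat < f →
      ((cs.length : Int) - j).toNat < f' → pvBFindEol cs f j = pvBFindEol cs f' j := by
  induction f with
  | zero => intro f' j hf _; omega
  | succ f ih =>
    intro f' j hf hf'
    by_cases hlt : j < (cs.length : Int)
    · cases f' with
      | zero => omega
      | succ f' =>
        rw [pvBFindEol, pvBFindEol, if_pos hlt, if_pos hlt]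
        cases hg : PySem.List.pyGet? cs j with
        | none => rfl
        | some c =>
          dsimp only
          by_cases heol : pvBIsEol c = true
          · rw [if_pos heol, if_pos heol]
          · rw [if_neg heol, if_neg heol]
            exact ih f' (j + 1) (by omega) (by omega)
    · cases f' with
      | zero => omega
      | succ f' => rw [pvBFindEol, pvBFindEol, if_neg hlt, if_neg hlt]

-- A's line-comment scan, past its first iteration, is B's EOL scan plus one slice
theorem pvLine_eq (cs : List Char) (f : Nat) :
    ∀ (j : Int) (ann : List Char), 0 ≤ j → ((cs.length : Int) - j).toNat < f →
      pvALineScan cs f j false ann =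
        (pvBFindEol cs f j, ann ++ PySem.List.slice cs (some j) (some (pvBFindEol cs f j))) := by
  induction f with
  | zero => intro j ann hj hf; omega
  | succ f ih =>
    intro j ann hj hf
    rw [pvALineScan, pvBFindEol]
    by_cases hlt : j < (cs.length : Int)
    · rw [if_pos hlt, if_pos hlt]
      obtain ⟨c, hc⟩ : ∃ c, PySem.List.pyGet? cs j = some c :=
        ⟨_, PySem.List.pyGet?_eq_some_getElem cs hj hlt⟩
      rw [hc]
      dsimp only
      by_cases heol : pvBIsEol c = true
      · rw [pvEol_eq, if_pos heol, if_pos heol,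
          pvSliceNil cs j j hj hj le_rfl]
        simp
      · rw [pvEol_eq, if_neg heol, if_neg heol]
        simp only [Bool.false_eq_true, if_false]
        rw [ih (j + 1) (ann ++ [c]) (by omega) (by omega)]
        have hge := pvBFindEol_ge cs f (j + 1)
        have hcg : cs[j.toNat]'(by omega) = c := by
          have h := PySem.List.pyGet?_eq_some_getElem cs hj hlt
          rw [h] at hc; exact Option.some.inj hc
        rw [pvSliceCons cs j (pvBFindEol cs f (j + 1)) hj hlt (by omega), hcg]
        simp
    · rw [if_neg hlt, if_neg hlt, pvSliceNil cs j j hj hj le_rfl]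
      simp

-- A's block-comment scan, past its first iteration, is B's '*/' search plus one slice
theorem pvBlock_eq (cs : List Char) (f : Nat) :
    ∀ (j : Int) (ann : List Char), 0 ≤ j → j ≤ (cs.length : Int) →
      ((cs.length : Int) - j).toNat < f →
      pvABlockScan cs f j false ann =
        (if pvBFindTerm cs f j = -1 then
          ((cs.length : Int), ann ++ PySem.List.slice cs (some j) (some (cs.length : Int)))
        else (pvBFindTerm cs f j + 2,
          ann ++ PySem.List.slice cs (some j) (some (pvBFindTerm cs f j)))) := by
  induction f with
  | zero => intro j ann hj hle hf; omega
  | succ f ih =>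
    intro j ann hj hle hf
    rw [pvABlockScan, pvBFindTerm]
    by_cases hlt : j < (cs.length : Int)
    · rw [if_pos hlt, if_pos hlt]
      obtain ⟨c, hc⟩ : ∃ c, PySem.List.pyGet? cs j = some c :=
        ⟨_, PySem.List.pyGet?_eq_some_getElem cs hj hlt⟩
      rw [hc]
      dsimp only
      by_cases hterm : PySem.List.pyGet? cs j = some '*' ∧
          PySem.List.pyGet? cs (j + 1) = some '/'
      · have hk1 : j + 1 < (cs.length : Int) := by
          by_contra hcon
          have hn : PySem.List.pyGet? cs (j + 1) = none :=
            (PySem.List.pyGet?_eq_none_iff cs (j + 1)).mpr (by simp [PySem.Raise.InRange]; omega)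
          simp_all
        have hcc : c = '*' := by rw [hc] at hterm; exact Option.some.inj hterm.1
        rw [if_pos (show some c = some '*' ∧ PySem.List.pyGet? cs (j + 1) = some '/' from
            ⟨by rw [hcc], hterm.2⟩),
          if_pos (⟨hcc, hk1, hterm.2⟩ : c = '*' ∧ j + 1 < (cs.length : Int) ∧
            PySem.List.pyGet? cs (j + 1) = some '/'),
          if_neg (by omega : ¬ j = -1),
          pvSliceNil cs j j hj hj le_rfl]
        simp
      · have hcond : ¬ (c = '*' ∧ j + 1 < (cs.length : Int) ∧
            PySem.List.pyGet? cs (j + 1) = some '/') := by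
          rintro ⟨e1, e2, e3⟩
          exact hterm ⟨by rw [hc, e1], e3⟩
        rw [if_neg hcond,
          if_neg (show ¬ (some c = some '*' ∧ PySem.List.pyGet? cs (j + 1) = some '/') from
            fun ⟨e1, e2⟩ => hterm ⟨hc.trans e1, e2⟩)]
        simp only [Bool.false_eq_true, if_false]
        rw [ih (j + 1) (ann ++ [c]) (by omega) (by omega) (by omega)]
        have hcg : cs[j.toNat]'(by omega) = c := by
          have h := PySem.List.pyGet?_eq_some_getElem cs hj hlt
          rw [h] at hc; exact Option.some.inj hc
        rcases pvBFindTerm_ge cs f (j + 1) with hneg | hge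
        · rw [hneg]
          rw [if_pos rfl, if_pos rfl]
          rw [pvSliceCons cs j (cs.length : Int) hj hlt (by omega), hcg]
          simp
        · have hne : ¬ pvBFindTerm cs f (j + 1) = -1 := by omega
          rw [if_neg hne, if_neg hne]
          rw [pvSliceCons cs j (pvBFindTerm cs f (j + 1)) hj hlt (by omega), hcg]
          simp
    · rw [if_neg hlt, if_neg hlt, if_pos rfl]
      have hk : j = (cs.length : Int) := by omega
      rw [pvSliceNil cs j (cs.length : Int) hj (by omega) (by omega)]
      simp [hk]

-- A's block scan entered with first_pass at the opening '*' (index i+1)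
theorem pvBlockFirst (cs : List Char) (f : Nat) (i : Int) (ann : List Char) (hi : 0 ≤ i)
    (hlt : i < (cs.length : Int)) (hi1 : i + 1 < (cs.length : Int))
    (hnxt : PySem.List.pyGet? cs (i + 1) = some '*')
    (hf : ((cs.length : Int) - (i + 1)).toNat < f) :
    pvABlockScan cs f (i + 1) true ann =
      (if pvBFindTerm cs f (i + 1) = -1 then
        ((cs.length : Int), ann ++ PySem.List.slice cs (some (i + 2)) (some (cs.length : Int)))
      else (pvBFindTerm cs f (i + 1) + 2,
        ann ++ PySem.List.slice cs (some (i + 2)) (some (pvBFindTerm cs f (i + 1))))) := by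
  cases f with
  | zero => omega
  | succ f =>
    rw [pvABlockScan, pvBFindTerm, if_pos hi1, if_pos hi1, hnxt]
    dsimp only
    by_cases hterm : PySem.List.pyGet? cs (i + 1 + 1) = some '/'
    · have hi2 : i + 1 + 1 < (cs.length : Int) := by
        by_contra hcon
        have hn : PySem.List.pyGet? cs (i + 1 + 1) = none :=
          (PySem.List.pyGet?_eq_none_iff cs (i + 1 + 1)).mpr (by simp [PySem.Raise.InRange]; omega)
        simp_all
      rw [if_pos (⟨rfl, hi2, hterm⟩ : ('*' : Char) = '*' ∧ i + 1 + 1 < (cs.length : Int) ∧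
          PySem.List.pyGet? cs (i + 1 + 1) = some '/'),
        if_pos (show some '*' = some '*' ∧ PySem.List.pyGet? cs (i + 1 + 1) = some '/' from
          ⟨rfl, hterm⟩),
        if_neg (by omega : ¬ (i + 1 : Int) = -1),
        pvSliceNil cs (i + 2) (i + 1) (by omega) (by omega) (by omega)]
      simp
    · rw [if_neg (show ¬ (('*' : Char) = '*' ∧ i + 1 + 1 < (cs.length : Int) ∧
            PySem.List.pyGet? cs (i + 1 + 1) = some '/') from fun ⟨_, _, h3⟩ => hterm h3),
        if_neg (show ¬ (some '*' = some '*' ∧ PySem.List.pyGet? cs (i + 1 + 1) = some '/') from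
          fun ⟨_, h2⟩ => hterm h2)]
      rw [if_pos (rfl : (true : Bool) = true)]
      rw [pvBlock_eq cs f (i + 1 + 1) ann (by omega) (by omega) (by omega),
        (by ring : (i : Int) + 1 + 1 = i + 2)]

-- the two outer loops agree from any nonnegative index (equal, sufficient fuel)
theorem pvLoop_eq (cs : List Char) (f : Nat) :
    ∀ (i : Int) (ann : List Char), 0 ≤ i → ((cs.length : Int) - i).toNat < f →
      pvALoop cs f i ann = pvBLoop cs f i ann := by
  induction f with
  | zero => intro i ann hi hf; omega
  | succ f ih =>
    intro i ann hi hf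
    rw [pvALoop, pvBLoop]
    by_cases hlt : i < (cs.length : Int)
    · rw [if_pos hlt, if_pos hlt]
      obtain ⟨c, hc⟩ : ∃ c, PySem.List.pyGet? cs i = some c :=
        ⟨_, PySem.List.pyGet?_eq_some_getElem cs hi hlt⟩
      rw [hc]
      dsimp only
      by_cases hsp : pvBIsSpace c = true
      · have hw := pvSpace_eq c
        rw [hsp] at hw
        rw [if_pos hsp]
        rcases Bool.or_eq_true_iff.mp hw with h | h
        · rw [if_pos h]; exact ih (i + 1) ann (by omega) (by omega)
        · by_cases h1 : IsSpecialWhitespace c = true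
          · rw [if_pos h1]; exact ih (i + 1) ann (by omega) (by omega)
          · rw [if_neg h1, if_pos h]; exact ih (i + 1) ann (by omega) (by omega)
      · have hw := pvSpace_eq c
        rw [eq_false_of_ne_true hsp, Bool.or_eq_false_iff] at hw
        rw [if_neg hsp, if_neg (show ¬ IsSpecialWhitespace c = true by simp [hw.1]),
          if_neg (show ¬ IsRegularWhitespace c = true by simp [hw.2])]
        by_cases hslash : c = '/'
        · rw [if_pos hslash, if_neg (show ¬ (c ≠ '/') from not_not_intro hslash)]
          by_cases hend : (cs.length : Int) ≤ i + 1
          · rw [if_pos hend, if_pos hend]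
          · rw [if_neg hend, if_neg hend]
            obtain ⟨nxt, hn⟩ : ∃ nxt, PySem.List.pyGet? cs (i + 1) = some nxt :=
              ⟨_, PySem.List.pyGet?_eq_some_getElem cs (by omega : (0:Int) ≤ i + 1) (by omega)⟩
            rw [hn]
            dsimp only
            by_cases hnl : nxt = '/'
            · rw [if_pos hnl, if_pos hnl]
              -- unfold the first iteration of A's line scan: char at i+1 is '/', not EOL
              rw [pvALineScan, if_pos (by omega : i + 1 < (cs.length : Int)), hn]
              dsimp only
              rw [hnl, if_neg (by decide : ¬ IsEndOfLine '/' = true),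
                if_pos (rfl : (true : Bool) = true)]
              have h22 : (i : Int) + 1 + 1 = i + 2 := by ring
              rw [h22]
              rw [pvLine_eq cs f (i + 2) ann (by omega) (by omega)]
              rw [pvBFindEol_fuel cs f (f + 1) (i + 2) (by omega) (by omega)]
              have hge := pvBFindEol_ge cs (f + 1) (i + 2)
              exact ih _ _ (by omega) (by omega)
            · rw [if_neg hnl, if_neg hnl]
              by_cases hns : nxt = '*'
              · rw [if_pos hns, if_pos hns]
                rw [hns] at hn
                rw [pvBlockFirst cs (f + 1) i ann hi hlt (by omega) hn (by omega)]
                rcases pvBFindTerm_ge cs (f + 1) (i + 1) with hneg | hge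
                · rw [hneg]
                  rw [if_pos rfl, if_pos rfl]
                  exact ih _ _ (by omega) (by omega)
                · have hne : ¬ pvBFindTerm cs (f + 1) (i + 1) = -1 := by omega
                  rw [if_neg hne, if_neg hne]
                  exact ih _ _ (by omega) (by omega)
              · rw [if_neg hns, if_neg hns]
        · rw [if_neg hslash, if_pos (show c ≠ '/' from hslash)]
    · rw [if_neg hlt, if_neg hlt]

-- ===== VERDICT (by name: the statement is the Claim_ definition above) =====
theorem IndexOfNextNonSpace_spec : Claim_equal_IndexOfNextNonSpace := by
  intro s i _ hpre
  unfold Spec_IndexOfNextNonSpace IndexOfNextNonSpace IndexOfNextNonSpace_alt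
  simp only []
  have h0 : (0 : Int) ≤ i := hpre
  rw [pvLoop_eq s.toList (s.toList.length + i.natAbs + 1) i [] h0 (by omega)]
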